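-- pv_equiv track=rewrite | github.com/Tixul/NGPC-craft | midi_to_ngpc/midi_to_ngpc.py | _build_attn_stream
-- ===== SOURCE A (Python) =====
-- def _velocity_to_attn(velocity: int, min_attn: int, max_attn: int) -> int:
--     # velocity 1..127 -> attn 0..15 (0 = loudest)
--     if velocity <= 0:
--         velocity = 1
--     velocity = min(127, velocity)
--     scale = 1.0 - (velocity / 127.0)
--     attn = int(round(min_attn + (max_attn - min_attn) * scale))
--     return max(0, min(15, attn))
--
-- def _build_attn_stream(
--     events: list[dict],
--     min_attn: int,
--     max_attn: int,
-- ) -> list[int]: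
--     out = []
--     for ev in events:
--         dur_units = ev["duration_frame"]
--         if dur_units <= 0:
--             dur_units = 1
--         attn = _velocity_to_attn(ev["velocity"], min_attn, max_attn)
--         while dur_units > 0:
--             chunk = min(255, dur_units)
--             out.extend([attn, chunk])
--             dur_units -= chunk
--     out.append(0xFF)  # terminator (attn values are 0..15)
--     return out
-- ===== SOURCE B (Python) =====
-- def _velocity_to_attn(velocity: int, min_attn: int, max_attn: int) -> int:
--     # velocity 1..127 -> attn 0..15 (0 = loudest)
--     if velocity <= 0:
--         velocity = 1
--     velocity = min(127, velocity)
--     scale = 1.0 - (velocity / 127.0)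
--     attn = int(round(min_attn + (max_attn - min_attn) * scale))
--     return max(0, min(15, attn))
--
-- def _build_attn_stream(
--     events: list[dict],
--     min_attn: int,
--     max_attn: int,
-- ) -> list[int]:
--     out = []
--     for ev in events:
--         dur_units = max(1, ev["duration_frame"])
--         attn = _velocity_to_attn(ev["velocity"], min_attn, max_attn)
--         full, rem = divmod(dur_units, 255)
--         out.extend([attn, 255] * full)
--         if rem:
--             out.extend([attn, rem])
--     out.append(0xFF)  # terminator (attn values are 0..15)
--     return out
-- ===== Notes on version B (the rewrite author's own statement) =====
-- stated objective: alternative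
-- what changed: The per-event while loop that peels 255-unit chunks one at a time is replaced by closed-form divmod arithmetic: full,rem = divmod(max(1,dur),255), emit [attn,255]*full plus an optional [attn,rem] tail; the helper _velocity_to_attn is unchanged.
import Mathlib
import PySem

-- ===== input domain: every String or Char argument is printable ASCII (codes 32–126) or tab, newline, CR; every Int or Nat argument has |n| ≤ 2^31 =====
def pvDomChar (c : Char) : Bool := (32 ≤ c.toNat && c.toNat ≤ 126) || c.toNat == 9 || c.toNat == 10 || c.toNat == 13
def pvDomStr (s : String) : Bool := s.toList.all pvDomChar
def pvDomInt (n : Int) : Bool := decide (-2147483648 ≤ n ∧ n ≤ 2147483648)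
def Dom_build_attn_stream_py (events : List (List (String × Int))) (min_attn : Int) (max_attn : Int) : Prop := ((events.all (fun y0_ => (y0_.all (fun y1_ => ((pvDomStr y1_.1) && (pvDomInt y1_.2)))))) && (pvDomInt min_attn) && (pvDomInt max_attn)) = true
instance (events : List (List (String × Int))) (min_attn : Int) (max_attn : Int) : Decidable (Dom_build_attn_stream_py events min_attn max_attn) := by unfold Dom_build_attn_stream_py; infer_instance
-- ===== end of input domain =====

-- B replaces A's per-event while loop (peeling 255-unit chunks) by closed-form divmod
-- arithmetic (objective: alternative; same _velocity_to_attn helper, same output).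

-- ===== PORT A =====
-- shared float helper: round-half-to-even of a rational to an integer (Python round())
def pyRoundHalfEven (q : ℚ) : Int :=
  let f := ⌊q⌋
  let r := q - (f : ℚ)
  if r < 1/2 then f
  else if r > 1/2 then f + 1
  else if f % 2 = 0 then f else f + 1

-- shared float helper: correctly-rounded conversion of a rational to an IEEE-754 binary64
-- value (nearest, ties to even), exact on the normal range this function uses (no
-- overflow/subnormals are reachable: |values| ≤ 2^33); this models each CPython float
-- operation (/, -, *, +), whose result is the correctly rounded exact rational result.
def roundBin64 (q : ℚ) : ℚ :=
  if q = 0 then 0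
  else
    let s : ℚ := if q < 0 then -1 else 1
    let e := Int.log 2 |q|
    (s * (pyRoundHalfEven (|q| * (2:ℚ)^(52 - e)) : ℚ)) * (2:ℚ)^(e - 52)

-- literal port of _velocity_to_attn (each float op modelled by roundBin64; exact, see above)
def velocity_to_attn_py (velocity : Int) (min_attn : Int) (max_attn : Int) : Int :=
  let v := if velocity ≤ 0 then 1 else velocity
  let v := min 127 v
  let scale := roundBin64 (1 - roundBin64 ((v : ℚ) / 127))
  let attn := pyRoundHalfEven (roundBin64 ((min_attn : ℚ) + roundBin64 (((max_attn - min_attn : Int) : ℚ) * scale)))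
  max 0 (min 15 attn)

-- A's inner while loop: peel min(255, dur) chunks while dur > 0
def chunksA (attn : Int) (dur : Int) (out : List Int) : List Int :=
  if h : 0 < dur then
    chunksA attn (dur - min 255 dur) (out ++ [attn, min 255 dur])
  else out
termination_by dur.toNat
decreasing_by omega

-- KeyError on a missing "duration_frame"/"velocity" key is excluded by Pre_ (getD 0 there)
def build_attn_stream_py (events : List (List (String × Int))) (min_attn : Int) (max_attn : Int) : List Int :=
  (events.foldl (fun out ev =>
    let dur_units := (List.lookup "duration_frame" ev).getD 0
    let dur_units := if dur_units ≤ 0 then 1 else dur_units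
    let attn := velocity_to_attn_py ((List.lookup "velocity" ev).getD 0) min_attn max_attn
    chunksA attn dur_units out) []) ++ [0xFF]

-- ===== PORT B =====
def build_attn_stream_py_alt (events : List (List (String × Int))) (min_attn : Int) (max_attn : Int) : List Int :=
  (events.foldl (fun out ev =>
    let dur_units := max 1 ((List.lookup "duration_frame" ev).getD 0)
    let attn := velocity_to_attn_py ((List.lookup "velocity" ev).getD 0) min_attn max_attn
    let full := PySem.Int.floordiv dur_units 255
    let rem := PySem.Int.mod dur_units 255
    let out := out ++ (List.replicate full.toNat ([attn, 255] : List Int)).flatten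
    if rem ≠ 0 then out ++ [attn, rem] else out) []) ++ [0xFF]

-- ===== PRECONDITION & SPEC =====
-- Pre_ excludes exactly the events missing a "duration_frame" or "velocity" key, on which A raises KeyError.
def Pre_build_attn_stream_py (events : List (List (String × Int))) (min_attn : Int) (max_attn : Int) : Prop :=
  ∀ ev ∈ events, (List.lookup "duration_frame" ev).isSome = true ∧ (List.lookup "velocity" ev).isSome = true
instance (events : List (List (String × Int))) (min_attn : Int) (max_attn : Int) : Decidable (Pre_build_attn_stream_py events min_attn max_attn) := by unfold Pre_build_attn_stream_py; infer_instance

def pvWitness_build_attn_stream_py : (List (List (String × Int))) × Int × Int :=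
  ([[("duration_frame", 3), ("velocity", 100)]], 0, 15)

def Spec_build_attn_stream_py (events : List (List (String × Int))) (min_attn : Int) (max_attn : Int) (out : List Int) : Prop := out = build_attn_stream_py_alt events min_attn max_attn
instance (events : List (List (String × Int))) (min_attn : Int) (max_attn : Int) (out : List Int) : Decidable (Spec_build_attn_stream_py events min_attn max_attn out) := by unfold Spec_build_attn_stream_py; infer_instance

-- ===== CLAIM (what is proved, stated in full; the proofs are below) =====
def Claim_equal_build_attn_stream_py : Prop := ∀ (events : List (List (String × Int))) (min_attn : Int) (max_attn : Int), Dom_build_attn_stream_py events min_attn max_attn → Pre_build_attn_stream_py events min_attn max_attn → Spec_build_attn_stream_py events min_attn max_attn (build_attn_stream_py events min_attn max_attn)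

-- ===== LEMMAS AND PROOFS =====

-- A's while loop, characterised: for dur ≥ 1 it emits ⌊dur/255⌋ pairs [attn,255] and,
-- if dur % 255 ≠ 0, one trailing pair [attn, dur % 255].
lemma chunksA_eq (attn : Int) : ∀ (n : Nat) (dur : Int), dur.toNat = n → 1 ≤ dur → ∀ out,
    chunksA attn dur out =
      out ++ (List.replicate (PySem.Int.floordiv dur 255).toNat ([attn, 255] : List Int)).flatten
          ++ (if PySem.Int.mod dur 255 ≠ 0 then [attn, PySem.Int.mod dur 255] else []) := by
  intro n
  induction n using Nat.strong_induction_on with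
  | _ n ih =>
    intro dur hn hdur out
    rw [PySem.Int.floordiv_eq_ediv_of_pos (by norm_num), PySem.Int.mod_eq_emod_of_pos (by norm_num)]
    rw [chunksA]
    by_cases h255 : dur ≤ 255
    · -- one final chunk of size dur
      have hmin : min 255 dur = dur := by omega
      rw [dif_pos (by omega), hmin]
      rw [chunksA, dif_neg (by omega)]
      by_cases heq : dur = 255
      · subst heq
        norm_num [List.replicate, List.flatten]
      · have hd : dur / 255 = 0 := by omega
        have hm : dur % 255 = dur := by omega
        simp [hd, hm, List.replicate]
        omega
    · -- chunk of 255, recurse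
      have hmin : min 255 dur = 255 := by omega
      rw [dif_pos (by omega), hmin]
      have hrec := ih (dur - 255).toNat (by omega) (dur - 255) rfl (by omega) (out ++ [attn, 255])
      rw [hrec, PySem.Int.floordiv_eq_ediv_of_pos (by norm_num),
          PySem.Int.mod_eq_emod_of_pos (by norm_num)]
      have hd : dur / 255 = (dur - 255) / 255 + 1 := by omega
      have hm : dur % 255 = (dur - 255) % 255 := by omega
      have htn : (dur / 255).toNat = ((dur - 255) / 255).toNat + 1 := by omega
      rw [htn, hm, List.replicate_succ, List.flatten_cons]
      simp [List.append_assoc]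

-- the two per-event step functions agree on every accumulator and event
lemma step_eq (min_attn max_attn : Int) (out : List Int) (ev : List (String × Int)) :
    (let dur_units := (List.lookup "duration_frame" ev).getD 0
     let dur_units := if dur_units ≤ 0 then 1 else dur_units
     let attn := velocity_to_attn_py ((List.lookup "velocity" ev).getD 0) min_attn max_attn
     chunksA attn dur_units out) =
    (let dur_units := max 1 ((List.lookup "duration_frame" ev).getD 0)
     let attn := velocity_to_attn_py ((List.lookup "velocity" ev).getD 0) min_attn max_attn
     let full := PySem.Int.floordiv dur_units 255
     let rem := PySem.Int.mod dur_units 255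
     let out := out ++ (List.replicate full.toNat ([attn, 255] : List Int)).flatten
     if rem ≠ 0 then out ++ [attn, rem] else out) := by
  set d0 := (List.lookup "duration_frame" ev).getD 0 with hd0
  set attn := velocity_to_attn_py ((List.lookup "velocity" ev).getD 0) min_attn max_attn with hattn
  have hdd : (if d0 ≤ 0 then 1 else d0) = max 1 d0 := by omega
  simp only [hdd]
  rw [chunksA_eq attn (max 1 d0).toNat (max 1 d0) rfl (by omega) out]
  split <;> simp [List.append_assoc]

lemma fold_eq (min_attn max_attn : Int) : ∀ (events : List (List (String × Int))) (acc : List Int),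
    events.foldl (fun out ev =>
      let dur_units := (List.lookup "duration_frame" ev).getD 0
      let dur_units := if dur_units ≤ 0 then 1 else dur_units
      let attn := velocity_to_attn_py ((List.lookup "velocity" ev).getD 0) min_attn max_attn
      chunksA attn dur_units out) acc =
    events.foldl (fun out ev =>
      let dur_units := max 1 ((List.lookup "duration_frame" ev).getD 0)
      let attn := velocity_to_attn_py ((List.lookup "velocity" ev).getD 0) min_attn max_attn
      let full := PySem.Int.floordiv dur_units 255
      let rem := PySem.Int.mod dur_units 255
      let out := out ++ (List.replicate full.toNat ([attn, 255] : List Int)).flatten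
      if rem ≠ 0 then out ++ [attn, rem] else out) acc := by
  intro events
  induction events with
  | nil => intro acc; rfl
  | cons ev rest ihr =>
    intro acc
    simp only [List.foldl_cons]
    rw [step_eq min_attn max_attn acc ev, ihr]

-- ===== VERDICT (by name: the statement is the Claim_ definition above) =====
theorem build_attn_stream_py_spec : Claim_equal_build_attn_stream_py := by
  intro events min_attn max_attn _hdom _hpre
  unfold Spec_build_attn_stream_py build_attn_stream_py build_attn_stream_py_alt
  rw [fold_eq]
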